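-- pv_equiv track=rewrite | github.com/Mohiiit/python-madara | recover.py | some_algo_optimized
-- ===== SOURCE A (Python) =====
-- P = 0x73eda753299d7d483339d80809a1d80553bda402fffe5bfeffffffff00000001
--
-- def some_algo_optimized(arr, xs):
--     n = len(arr)
--     transform = [0] * n
--     mod_inv = [pow(x, P-2, P) for x in xs]  # Pre-compute modular inverses
--
--     for i in range(n):
--         xi_pow_j = 1  # Initialize to xs[i]**0
--         for j in range(n):
--             transform[i] += arr[j] * xi_pow_j
--             xi_pow_j = (xi_pow_j * xs[i]) % P  # Update power for next iteration
--         transform[i] %= P  # Apply modulo once per outer loop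
--
--     return transform
-- ===== SOURCE B (Python) =====
-- P = 0x73eda753299d7d483339d80809a1d80553bda402fffe5bfeffffffff00000001
--
-- def some_algo_optimized(arr, xs):
--     # Horner evaluation of the polynomial arr (coefficients in ascending order)
--     # at each of the first len(arr) points, reducing mod P at every step.
--     rev = arr[::-1]
--     out = []
--     for x in xs[:len(arr)]:
--         acc = 0
--         for c in rev:
--             acc = (acc * x + c) % P
--         out.append(acc)
--     return out
-- ===== Notes on version B (the rewrite author's own statement) =====
-- stated objective: faster
-- what changed: Horner's rule over the reversed coefficient list with reduction mod P at every step, instead of maintaining an explicit power accumulator per term; the dead per-point modular-inverse pow(x, P-2, P) precomputation is dropped.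
import Mathlib
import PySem

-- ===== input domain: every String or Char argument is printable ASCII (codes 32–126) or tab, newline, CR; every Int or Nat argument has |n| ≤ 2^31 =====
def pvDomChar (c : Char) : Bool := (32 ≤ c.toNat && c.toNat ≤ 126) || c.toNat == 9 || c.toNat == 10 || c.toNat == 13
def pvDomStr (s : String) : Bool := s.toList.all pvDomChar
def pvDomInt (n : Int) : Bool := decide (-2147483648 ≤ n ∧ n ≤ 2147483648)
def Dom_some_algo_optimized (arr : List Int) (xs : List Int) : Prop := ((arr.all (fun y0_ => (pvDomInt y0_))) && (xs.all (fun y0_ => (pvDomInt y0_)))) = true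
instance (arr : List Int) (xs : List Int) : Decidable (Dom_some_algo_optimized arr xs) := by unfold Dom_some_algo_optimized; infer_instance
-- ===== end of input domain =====

-- B replaces A's explicit power accumulator (plus a dead per-point modular-inverse
-- precomputation) by Horner's rule with reduction mod P at every step; equivalence is
-- about the return value, neither program mutates its arguments.

def pvP : Int := 52435875175126190479447740508185965837690552500527637822603658699938581184513

-- ===== PORT A =====
-- Python pow(b, e, m) for m > 0, e ≥ 0 (binary exponentiation; Int % here is emod,
-- nonnegative for positive m, exactly Python's %).
def pvModPow (b : Int) (e : Nat) (m : Int) : Int :=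
  if e = 0 then 1 % m
  else
    let h := pvModPow b (e / 2) m
    if e % 2 = 0 then h * h % m else h * h % m * (b % m) % m
decreasing_by exact Nat.div_lt_self (Nat.pos_of_ne_zero (by assumption)) (by norm_num)

def some_algo_optimized (arr : List Int) (xs : List Int) : List Int :=
  let n := arr.length
  let transform : List Int := List.replicate n 0
  -- mod_inv is computed by A but never used
  let _mod_inv : List Int := xs.map (fun x => pvModPow x (pvP - 2).toNat pvP)
  (PySem.List.pyRange 0 (n : Int) 1).foldl (fun t i =>
    let res := (PySem.List.pyRange 0 (n : Int) 1).foldl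
      (fun (s : Int × Int) j =>
        (s.1 + PySem.List.pyGetD arr j 0 * s.2,
         s.2 * PySem.List.pyGetD xs i 0 % pvP))
      (PySem.List.pyGetD t i 0, 1)
    PySem.List.pySetD t i (res.1 % pvP)) transform

-- ===== PORT B =====
def some_algo_optimized_alt (arr : List Int) (xs : List Int) : List Int :=
  let rev := arr.reverse               -- arr[::-1]
  (PySem.List.slice xs none (some (arr.length : Int))).foldl   -- for x in xs[:len(arr)]
    (fun out x => out ++ [rev.foldl (fun acc c => (acc * x + c) % pvP) 0]) []

-- ===== PRECONDITION & SPEC =====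
-- A raises IndexError (xs[i]) as soon as len(arr) > len(xs); those inputs are excluded.
def Pre_some_algo_optimized (arr : List Int) (xs : List Int) : Prop := arr.length ≤ xs.length
instance (arr : List Int) (xs : List Int) : Decidable (Pre_some_algo_optimized arr xs) := by
  unfold Pre_some_algo_optimized; infer_instance
def pvWitness_some_algo_optimized : List Int × List Int := ([1, 2], [3, 4])

def Spec_some_algo_optimized (arr : List Int) (xs : List Int) (out : List Int) : Prop := out = some_algo_optimized_alt arr xs
instance (arr : List Int) (xs : List Int) (out : List Int) : Decidable (Spec_some_algo_optimized arr xs out) := by unfold Spec_some_algo_optimized; infer_instance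

-- ===== CLAIM (what is proved, stated in full; the proofs are below) =====
def Claim_equal_some_algo_optimized : Prop := ∀ (arr : List Int) (xs : List Int), Dom_some_algo_optimized arr xs → Pre_some_algo_optimized arr xs → Spec_some_algo_optimized arr xs (some_algo_optimized arr xs)

-- ===== LEMMAS AND PROOFS =====

-- the polynomial with coefficient list l (ascending) evaluated at x, over ℤ
def pvPoly (x : Int) : List Int → Int
  | [] => 0
  | c :: t => c + pvPoly x t * x

lemma pv_absorb (A B C : Int) : (A + B * (C % pvP)) % pvP = (A + B * C) % pvP := by
  conv_lhs => rw [Int.add_emod, Int.mul_emod, Int.emod_emod_of_dvd _ dvd_rfl,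
    ← Int.mul_emod, ← Int.add_emod]

-- B's inner loop (Horner) computes pvPoly mod P
lemma pv_horner (x : Int) (l : List Int) :
    l.foldr (fun c a => (a * x + c) % pvP) 0 = pvPoly x l % pvP := by
  induction l with
  | nil => simp [pvPoly]
  | cons c t ih =>
    simp only [List.foldr, ih, pvPoly]
    calc (pvPoly x t % pvP * x + c) % pvP
        = (c + x * (pvPoly x t % pvP)) % pvP := by ring_nf
      _ = (c + x * pvPoly x t) % pvP := pv_absorb c x (pvPoly x t)
      _ = (c + pvPoly x t * x) % pvP := by ring_nf

-- A's inner loop (power accumulator) computes pvPoly mod P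
lemma pv_innerA (x : Int) : ∀ (l : List Int) (acc pw : Int),
    (l.foldl (fun (s : Int × Int) c => (s.1 + c * s.2, s.2 * x % pvP)) (acc, pw)).1 % pvP
      = (acc + pvPoly x l * pw) % pvP := by
  intro l
  induction l with
  | nil => intro acc pw; simp [pvPoly]
  | cons c t ih =>
    intro acc pw
    simp only [List.foldl, pvPoly]
    rw [ih]
    calc (acc + c * pw + pvPoly x t * (pw * x % pvP)) % pvP
        = (acc + c * pw + pvPoly x t * (pw * x)) % pvP :=
          pv_absorb (acc + c * pw) (pvPoly x t) (pw * x)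
      _ = (acc + (c + pvPoly x t * x) * pw) % pvP := by ring_nf

-- the step of A's outer loop, after the PySem primitives are reduced
def pvStep (arr xs : List Int) (t : List Int) (k : Nat) : List Int :=
  t.set k ((arr.foldl
    (fun (s : Int × Int) c => (s.1 + c * s.2, s.2 * (xs.getD k 0) % pvP))
    (t.getD k 0, 1)).1 % pvP)

lemma pv_outer_inv (arr xs : List Int) : ∀ (k : Nat), k ≤ arr.length →
    (List.range k).foldl (pvStep arr xs) (List.replicate arr.length 0)
      = (List.range arr.length).map
          (fun i => if i < k then pvPoly (xs.getD i 0) arr % pvP else 0) := by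
  intro k
  induction k with
  | zero => intro _; simp [List.map_const']
  | succ k ih =>
    intro hk
    have hk' : k < arr.length := hk
    rw [List.range_succ, List.foldl_append, ih (Nat.le_of_lt hk'), List.foldl_cons,
      List.foldl_nil]
    unfold pvStep
    have hget : ((List.range arr.length).map
        (fun i => if i < k then pvPoly (xs.getD i 0) arr % pvP else 0)).getD k 0 = 0 := by
      rw [List.getD_eq_getElem _ _ (by simpa using hk')]
      simp
    rw [hget, pv_innerA]
    apply List.ext_getElem (by simp)
    intro i h1 h2
    have hi : i < arr.length := by simpa using h2
    simp only [List.getElem_set, List.getElem_map, List.getElem_range]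
    by_cases hik : k = i
    · subst hik; simp
    · simp only [if_neg hik]
      by_cases hlt : i < k
      · rw [if_pos hlt, if_pos (Nat.lt_succ_of_lt hlt)]
      · rw [if_neg hlt, if_neg (by omega)]

-- a fold over range(len l) indexing into l is the fold over l
lemma pv_fold_idx {B : Type} (f : B → Int → B) (l : List Int) : ∀ (init : B),
    (List.range l.length).foldl (fun s j => f s (l[j]?.getD 0)) init = l.foldl f init := by
  induction l using List.reverseRecOn with
  | nil => intro init; simp
  | append_singleton l a ih =>
    intro init
    rw [List.length_append, List.length_singleton, List.range_succ, List.foldl_append,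
      List.foldl_append]
    have hcongr : (List.range l.length).foldl
        (fun s j => f s ((l ++ [a])[j]?.getD 0)) init
        = (List.range l.length).foldl (fun s j => f s (l[j]?.getD 0)) init := by
      apply PySem.List.foldl_congr_mem
      intro s j hj
      rw [List.getElem?_append_left (List.mem_range.mp hj)]
    rw [hcongr, ih]
    simp

-- A, with the PySem range/index primitives reduced, is the pvStep fold
lemma pv_A_eq (arr xs : List Int) :
    some_algo_optimized arr xs
      = (List.range arr.length).foldl (pvStep arr xs) (List.replicate arr.length 0) := by
  unfold some_algo_optimized
  simp only [PySem.List.pyRange_zero_nat, List.foldl_map]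
  apply PySem.List.foldl_congr_mem
  intro t k _
  unfold pvStep
  simp only [PySem.List.pyGetD_natCast, PySem.List.pySetD_natCast, List.getD_eq_getElem?_getD]
  rw [pv_fold_idx (fun (s : Int × Int) c => (s.1 + c * s.2, s.2 * (xs[k]?.getD 0) % pvP)) arr]

-- B, with the PySem slice reduced, is a map of Horner over the first len(arr) points
lemma pv_B_eq (arr xs : List Int) :
    some_algo_optimized_alt arr xs
      = (xs.take arr.length).map (fun x => pvPoly x arr % pvP) := by
  unfold some_algo_optimized_alt
  rw [PySem.List.slice_to_natCast, PySem.List.foldl_append_singleton_eq_map]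
  simp only [List.nil_append]
  apply List.map_congr_left
  intro x _
  rw [List.foldl_reverse]
  exact pv_horner x arr

-- ===== VERDICT (by name: the statement is the Claim_ definition above) =====
theorem some_algo_optimized_spec : Claim_equal_some_algo_optimized := by
  intro arr xs _ hpre
  have hp : arr.length ≤ xs.length := hpre
  unfold Spec_some_algo_optimized
  rw [pv_A_eq, pv_B_eq, pv_outer_inv arr xs arr.length (le_refl _)]
  apply List.ext_getElem (by simp; omega)
  intro i h1 h2
  have hi : i < arr.length := by simpa using h1
  have hix : i < xs.length := lt_of_lt_of_le hi hp
  simp [hi, List.getElem?_eq_getElem hix]
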